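-- pv_equiv track=rewrite | github.com/2CentsCapitalHR/ai-engineer-task-Chinmay-Tripathi | classifier.py | _determine_process
-- ===== SOURCE A (Python) =====
-- def _determine_process(document_types):
--     if not isinstance(document_types, list):
--         return "general_submission"
--
--     document_types_str = [str(doc) for doc in document_types]
--
--     incorporation_indicators = ['articles_of_association', 'memorandum_of_association', 'incorporation_application']
--     licensing_indicators = ['licensing_application', 'regulatory_filing']
--     compliance_indicators = ['compliance_policy', 'regulatory_filing', 'audit_report']
--
--     incorporation_count = sum(1 for doc in document_types_str if doc in incorporation_indicators)
--     licensing_count = sum(1 for doc in document_types_str if doc in licensing_indicators)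
--     compliance_count = sum(1 for doc in document_types_str if doc in compliance_indicators)
--
--     if incorporation_count >= 2:
--         return "company_incorporation"
--     elif licensing_count >= 1:
--         return "licensing_application"
--     elif compliance_count >= 1:
--         return "compliance_filing"
--     else:
--         return "general_submission"
-- ===== SOURCE B (Python) =====
-- def _determine_process(document_types):
--     if not isinstance(document_types, list):
--         return "general_submission"
--
--     # single fused pass with early exit: track incorporation hits as a count
--     # (answer is decided as soon as it reaches 2) and licensing/compliance as
--     # boolean "seen" flags, since their thresholds are only >= 1.
--     inc = 0
--     saw_licensing = False
--     saw_compliance = False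
--     for doc in document_types:
--         s = str(doc)
--         if s in ('articles_of_association', 'memorandum_of_association',
--                  'incorporation_application'):
--             inc += 1
--             if inc >= 2:
--                 return "company_incorporation"
--         if s == 'regulatory_filing':
--             saw_licensing = True
--             saw_compliance = True
--         elif s == 'licensing_application':
--             saw_licensing = True
--         elif s in ('compliance_policy', 'audit_report'):
--             saw_compliance = True
--     if saw_licensing:
--         return "licensing_application"
--     if saw_compliance:
--         return "compliance_filing"
--     return "general_submission"
-- ===== Notes on version B (the rewrite author's own statement) =====
-- stated objective: alternative
-- what changed: Replaces A's three staged membership-scans plus final threshold cascade by one fused pass carrying a small state (an incorporation counter that early-returns at 2, and two boolean seen-flags for licensing/compliance), with the verdict read off the state at the end.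
import Mathlib
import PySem

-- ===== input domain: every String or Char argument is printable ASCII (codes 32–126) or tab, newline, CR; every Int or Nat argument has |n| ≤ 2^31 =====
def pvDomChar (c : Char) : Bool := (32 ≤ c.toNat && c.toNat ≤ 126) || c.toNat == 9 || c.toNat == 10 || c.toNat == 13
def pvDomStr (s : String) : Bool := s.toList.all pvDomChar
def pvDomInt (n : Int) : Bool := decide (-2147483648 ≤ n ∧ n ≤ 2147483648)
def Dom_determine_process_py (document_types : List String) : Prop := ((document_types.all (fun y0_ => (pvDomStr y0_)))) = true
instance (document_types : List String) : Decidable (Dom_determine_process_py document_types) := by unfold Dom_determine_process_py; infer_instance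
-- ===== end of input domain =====

-- B replaces A's three membership scans and final cascade by one fused pass with an early-exit counter and two seen-flags; alternative decomposition, same results.


-- ===== PORT A =====
-- str(doc) is the identity on String; the isinstance guard is vacuous under the List String type.
def determine_process_py (document_types : List String) : String :=
  let document_types_str := document_types.map (fun doc => doc)
  let incorporation_indicators := ["articles_of_association", "memorandum_of_association", "incorporation_application"]
  let licensing_indicators := ["licensing_application", "regulatory_filing"]
  let compliance_indicators := ["compliance_policy", "regulatory_filing", "audit_report"]
  let incorporation_count : Int := document_types_str.foldl (fun a doc => if incorporation_indicators.contains doc then a + 1 else a) 0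
  let licensing_count : Int := document_types_str.foldl (fun a doc => if licensing_indicators.contains doc then a + 1 else a) 0
  let compliance_count : Int := document_types_str.foldl (fun a doc => if compliance_indicators.contains doc then a + 1 else a) 0
  if incorporation_count ≥ 2 then "company_incorporation"
  else if licensing_count ≥ 1 then "licensing_application"
  else if compliance_count ≥ 1 then "compliance_filing"
  else "general_submission"

-- ===== PORT B =====
-- the flag-update elif chain of Source B's loop body
def pv_flags (s : String) (saw_lic saw_comp : Bool) : Bool × Bool :=
  if s = "regulatory_filing" then (true, true)
  else if s = "licensing_application" then (true, saw_comp)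
  else if s = "compliance_policy" || s = "audit_report" then (saw_lic, true)
  else (saw_lic, saw_comp)

-- Source B's loop: early return once the incorporation counter reaches 2, otherwise thread the state
def pv_altGo : List String → Int → Bool → Bool → String
  | [], _inc, saw_lic, saw_comp =>
    if saw_lic then "licensing_application"
    else if saw_comp then "compliance_filing"
    else "general_submission"
  | s :: rest, inc, saw_lic, saw_comp =>
    if ["articles_of_association", "memorandum_of_association", "incorporation_application"].contains s then
      if inc + 1 ≥ 2 then "company_incorporation"
      else
        let p := pv_flags s saw_lic saw_comp
        pv_altGo rest (inc + 1) p.1 p.2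
    else
      let p := pv_flags s saw_lic saw_comp
      pv_altGo rest inc p.1 p.2

def determine_process_py_alt (document_types : List String) : String :=
  pv_altGo document_types 0 false false

-- ===== PRECONDITION & SPEC =====
def Spec_determine_process_py (document_types : List String) (out : String) : Prop := out = determine_process_py_alt document_types
instance (document_types : List String) (out : String) : Decidable (Spec_determine_process_py document_types out) := by unfold Spec_determine_process_py; infer_instance

-- ===== CLAIM (what is proved, stated in full; the proofs are below) =====
def Claim_equal_determine_process_py : Prop := ∀ (document_types : List String), Dom_determine_process_py document_types → Spec_determine_process_py document_types (determine_process_py document_types)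

-- ===== LEMMAS AND PROOFS =====

-- number of elements of l lying in the indicator list L, as an Int
def pv_cnt (L l : List String) : Int := ((l.filter (fun d => L.contains d)).length : Int)

theorem pv_cnt_nonneg (L l : List String) : 0 ≤ pv_cnt L l := Int.natCast_nonneg _

theorem pv_cnt_nil (L : List String) : pv_cnt L [] = 0 := rfl

theorem pv_cnt_cons (L : List String) (s : String) (l : List String) :
    pv_cnt L (s :: l) = (if L.contains s then 1 else 0) + pv_cnt L l := by
  unfold pv_cnt
  rw [List.filter_cons]
  split_ifs with h <;> simp [h] <;> omega

theorem pv_foldl_cnt (L : List String) (l : List String) (a : Int) :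
    l.foldl (fun a doc => if L.contains doc then a + 1 else a) a = a + pv_cnt L l := by
  induction l generalizing a with
  | nil => simp [pv_cnt_nil]
  | cons x xs ih =>
    rw [List.foldl_cons, pv_cnt_cons]
    split_ifs with h <;> rw [ih] <;> ring

theorem pv_flags_eq (s : String) (lic comp : Bool) :
    pv_flags s lic comp =
      (lic || ["licensing_application", "regulatory_filing"].contains s,
       comp || ["compliance_policy", "regulatory_filing", "audit_report"].contains s) := by
  unfold pv_flags
  by_cases h1 : s = "regulatory_filing" <;>
    by_cases h2 : s = "licensing_application" <;>
      by_cases h3 : s = "compliance_policy" <;>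
        by_cases h4 : s = "audit_report" <;>
          simp_all

-- cascade congruence: a seen-flag OR'ed into the condition equals counting that element
theorem pv_cascade_step (inc I L C : Int) (bL bC lic comp : Bool) (X Y Z W : String)
    (hL : 0 ≤ L) (hC : 0 ≤ C) :
    (if 2 ≤ inc + I then X
     else if (lic || bL) = true ∨ 1 ≤ L then Y
     else if (comp || bC) = true ∨ 1 ≤ C then Z else W)
    = (if 2 ≤ inc + I then X
       else if lic = true ∨ 1 ≤ (if bL = true then 1 else 0) + L then Y
       else if comp = true ∨ 1 ≤ (if bC = true then 1 else 0) + C then Z else W) := by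
  rcases bL <;> rcases bC <;> rcases lic <;> rcases comp <;>
    simp only [Bool.or_true, Bool.or_false, Bool.false_eq_true, if_true, if_false,
      true_or, false_or, zero_add] <;>
    split_ifs <;> first | rfl | omega

-- loop invariant: with inc still below 2, the loop computes the cascade on the final counts/flags
theorem pv_altGo_spec (l : List String) : ∀ (inc : Int) (lic comp : Bool), inc < 2 →
    pv_altGo l inc lic comp =
      (if 2 ≤ inc + pv_cnt ["articles_of_association", "memorandum_of_association", "incorporation_application"] l then "company_incorporation"
       else if lic = true ∨ 1 ≤ pv_cnt ["licensing_application", "regulatory_filing"] l then "licensing_application"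
       else if comp = true ∨ 1 ≤ pv_cnt ["compliance_policy", "regulatory_filing", "audit_report"] l then "compliance_filing"
       else "general_submission") := by
  induction l with
  | nil =>
    intro inc lic comp hinc
    have h : ¬ (2 ≤ inc + pv_cnt ["articles_of_association", "memorandum_of_association", "incorporation_application"] []) := by
      rw [pv_cnt_nil]; omega
    rw [if_neg h]
    rcases lic <;> rcases comp <;> simp [pv_altGo, pv_cnt_nil]
  | cons s rest ih =>
    intro inc lic comp hinc
    have hIncNN := pv_cnt_nonneg ["articles_of_association", "memorandum_of_association", "incorporation_application"] rest
    have hLicNN := pv_cnt_nonneg ["licensing_application", "regulatory_filing"] rest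
    have hCompNN := pv_cnt_nonneg ["compliance_policy", "regulatory_filing", "audit_report"] rest
    rw [pv_cnt_cons, pv_cnt_cons, pv_cnt_cons]
    simp only [pv_altGo, pv_flags_eq]
    by_cases hhit : (["articles_of_association", "memorandum_of_association", "incorporation_application"] : List String).contains s = true
    · have hs : s = "articles_of_association" ∨ s = "memorandum_of_association" ∨ s = "incorporation_application" := by
        simpa using hhit
      have hnl : (["licensing_application", "regulatory_filing"] : List String).contains s = false := by
        rcases hs with h | h | h <;> subst h <;> rfl
      have hnc : (["compliance_policy", "regulatory_filing", "audit_report"] : List String).contains s = false := by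
        rcases hs with h | h | h <;> subst h <;> rfl
      rw [if_pos hhit]
      simp only [hhit, hnl, hnc, Bool.false_eq_true, if_true, if_false, zero_add, Bool.or_false]
      by_cases hearly : inc + 1 ≥ 2
      · rw [if_pos hearly, if_pos (by omega)]
      · rw [if_neg hearly, ih (inc + 1) _ _ (by omega)]
        have e : inc + 1 + pv_cnt ["articles_of_association", "memorandum_of_association", "incorporation_application"] rest
            = inc + (1 + pv_cnt ["articles_of_association", "memorandum_of_association", "incorporation_application"] rest) := by ring
        rw [e]
    · have hhitb : (["articles_of_association", "memorandum_of_association", "incorporation_application"] : List String).contains s = false :=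
        Bool.eq_false_iff.mpr hhit
      rw [if_neg hhit, ih inc _ _ hinc]
      simp only [hhitb, Bool.false_eq_true, if_false, zero_add]
      exact pv_cascade_step inc _ _ _ _ _ lic comp _ _ _ _ hLicNN hCompNN

-- ===== VERDICT (by name: the statement is the Claim_ definition above) =====
theorem determine_process_py_spec : Claim_equal_determine_process_py := by
  intro l _
  unfold Spec_determine_process_py determine_process_py determine_process_py_alt
  simp only [List.map_id']
  rw [pv_foldl_cnt, pv_foldl_cnt, pv_foldl_cnt,
      pv_altGo_spec l 0 false false (by omega)]
  simp only [zero_add, ge_iff_le, Bool.false_eq_true, false_or]
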